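-- pv_equiv track=rewrite | github.com/swosu/SwosuCsPythonExamples | CS1_CS2/Coding_Odyssey/sorting_and_searching/sizes.py | log_sizes
-- ===== SOURCE A (Python) =====
-- def log_sizes(start: int = 10, decades: int = 6) -> list[int]:
--     """
--     Log-ish growth sizes: start, start*10, start*100, ...
--     decades=6 -> 10, 100, 1000, 10000, 100000, 1000000
--     """
--     if start <= 0:
--         raise ValueError("start must be > 0")
--     if decades < 1:
--         raise ValueError("decades must be >= 1")
--
--     sizes: list[int] = []
--     value = start
--     for _ in range(decades):
--         sizes.append(value)
--         value *= 10
--     return sizes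
-- ===== SOURCE B (Python) =====
-- def log_sizes(start: int = 10, decades: int = 6) -> list[int]:
--     """Log-ish growth sizes via closed form: element i is start * 10**i."""
--     if start <= 0:
--         raise ValueError("start must be > 0")
--     if decades < 1:
--         raise ValueError("decades must be >= 1")
--     return [start * 10 ** i for i in range(decades)]
-- ===== Notes on version B (the rewrite author's own statement) =====
-- stated objective: idiomatic
-- what changed: Replaced the accumulator loop carrying a running 'value' with a closed-form comprehension computing each element independently as start * 10**i.
import Mathlib
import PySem

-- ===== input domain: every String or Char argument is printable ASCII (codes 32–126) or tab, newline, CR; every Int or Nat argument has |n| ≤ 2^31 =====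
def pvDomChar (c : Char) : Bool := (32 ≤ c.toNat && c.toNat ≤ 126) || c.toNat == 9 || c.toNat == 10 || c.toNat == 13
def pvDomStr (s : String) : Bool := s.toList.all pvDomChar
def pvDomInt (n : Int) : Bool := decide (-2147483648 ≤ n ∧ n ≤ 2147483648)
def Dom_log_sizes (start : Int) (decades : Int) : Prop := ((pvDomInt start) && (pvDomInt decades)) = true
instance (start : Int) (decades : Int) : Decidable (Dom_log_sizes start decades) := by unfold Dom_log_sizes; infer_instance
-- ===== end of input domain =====

-- B replaces A's running-value accumulator loop with a closed-form comprehension (start * 10**i); same values, return-value equivalence on the non-raising inputs.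
-- ===== PORT A =====
def log_sizes (start : Int) (decades : Int) : List Int :=
  -- sizes = []; value = start; for _ in range(decades): sizes.append(value); value *= 10
  ((PySem.List.pyRange 0 decades 1).foldl
      (fun (st : List Int × Int) _ => (st.1 ++ [st.2], st.2 * 10)) ([], start)).1

-- ===== PORT B =====
def log_sizes_alt (start : Int) (decades : Int) : List Int :=
  (PySem.List.pyRange 0 decades 1).map (fun i => start * 10 ^ i.toNat)

-- ===== PRECONDITION & SPEC =====
-- A raises ValueError when start <= 0 or decades < 1; exactly those inputs are excluded.
def Pre_log_sizes (start : Int) (decades : Int) : Prop := 0 < start ∧ 1 ≤ decades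
instance (start : Int) (decades : Int) : Decidable (Pre_log_sizes start decades) := by unfold Pre_log_sizes; infer_instance
def pvWitness_log_sizes : Int × Int := (10, 6)

def Spec_log_sizes (start : Int) (decades : Int) (out : List Int) : Prop := out = log_sizes_alt start decades
instance (start : Int) (decades : Int) (out : List Int) : Decidable (Spec_log_sizes start decades out) := by unfold Spec_log_sizes; infer_instance

-- ===== CLAIM (what is proved, stated in full; the proofs are below) =====
def Claim_equal_log_sizes : Prop := ∀ (start : Int) (decades : Int), Dom_log_sizes start decades → Pre_log_sizes start decades → Spec_log_sizes start decades (log_sizes start decades)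

-- ===== LEMMAS AND PROOFS =====

-- Invariant of A's loop over List.range n: the accumulated list extends by v*10^k at each step
-- and the carried value is v*10^n.
theorem log_sizes_fold_range (n : Nat) (acc : List Int) (v : Int) :
    (List.range n).foldl (fun (st : List Int × Int) _ => (st.1 ++ [st.2], st.2 * 10)) (acc, v)
      = (acc ++ (List.range n).map (fun k => v * 10 ^ k), v * 10 ^ n) := by
  induction n generalizing acc v with
  | zero => simp
  | succ n ih =>
      rw [List.range_succ, List.foldl_append, ih]
      simp [List.map_append, pow_succ, mul_assoc]

theorem log_sizes_spec : Claim_equal_log_sizes := by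
  intro start decades _ _
  unfold Spec_log_sizes log_sizes log_sizes_alt
  rw [PySem.List.pyRange_one]
  simp only [List.foldl_map, List.map_map]
  rw [log_sizes_fold_range]
  simp
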